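-- pv_equiv track=rewrite | github.com/munsie/aoc-2023 | day2/game.py | eval_game
-- ===== SOURCE A (Python) =====
-- def eval_game(game, num_red, num_green, num_blue):
--     # evaluate each round in the game to see if the number of each color is possible, along with the total
--     num_total = num_red + num_green + num_blue
--
--     for round in game['rounds']:
--         if 'red' in round and round['red'] > num_red:
--             return False
--         if 'green' in round and round['green'] > num_green:
--             return False
--         if 'blue' in round and round['blue'] > num_blue:
--             return False
--         if round['total'] > num_total:
--             return False
--
--     return True
-- ===== SOURCE B (Python) =====
-- def eval_game(game, num_red, num_green, num_blue):
--     # aggregate-then-compare: worst observed count per color and total, then one conjunction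
--     rounds = game['rounds']
--     def worst(color, limit):
--         return max((r[color] for r in rounds if color in r), default=limit)
--     return (worst('red', num_red) <= num_red
--             and worst('green', num_green) <= num_green
--             and worst('blue', num_blue) <= num_blue
--             and worst('total', num_red + num_green + num_blue) <= num_red + num_green + num_blue)
-- ===== Notes on version B (the rewrite author's own statement) =====
-- stated objective: simpler
-- what changed: Replaces the early-exit per-round scan of four checks by computing the maximum observed count per color and for the total across all rounds and returning one conjunction of comparisons against the limits.
import Mathlib
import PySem

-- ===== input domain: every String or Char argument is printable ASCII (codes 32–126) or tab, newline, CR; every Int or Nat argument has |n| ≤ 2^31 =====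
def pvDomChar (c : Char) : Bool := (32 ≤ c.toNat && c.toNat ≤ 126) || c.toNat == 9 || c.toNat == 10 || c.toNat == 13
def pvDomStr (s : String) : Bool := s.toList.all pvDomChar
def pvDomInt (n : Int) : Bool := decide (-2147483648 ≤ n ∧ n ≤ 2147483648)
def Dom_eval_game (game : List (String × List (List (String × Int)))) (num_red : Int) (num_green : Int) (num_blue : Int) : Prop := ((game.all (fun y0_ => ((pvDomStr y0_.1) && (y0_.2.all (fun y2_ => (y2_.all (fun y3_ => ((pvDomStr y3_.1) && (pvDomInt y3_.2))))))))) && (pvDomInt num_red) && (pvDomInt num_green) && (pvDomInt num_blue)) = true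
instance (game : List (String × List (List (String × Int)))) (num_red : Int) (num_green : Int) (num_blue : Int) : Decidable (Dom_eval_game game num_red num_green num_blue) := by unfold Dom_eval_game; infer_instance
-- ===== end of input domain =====

-- B replaces A's early-exit per-round scan by aggregating the worst (maximum) observed count per
-- color and total, then one conjunction of comparisons; same O(n) cost, plainer shape.

-- shared dict-lookup primitive (Python dict access: first match in the association list)
def dget? {α : Type} (d : List (String × α)) (k : String) : Option α :=
  (d.find? (fun p => p.1 == k)).map (·.2)

-- ===== PORT A =====
-- the for-loop of A with its early returns, in the same branch order
def evalRoundsA (num_red num_green num_blue num_total : Int) : List (List (String × Int)) → Bool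
  | [] => true
  | r :: rest =>
    if (match dget? r "red" with | some v => decide (v > num_red) | none => false) then false
    else if (match dget? r "green" with | some v => decide (v > num_green) | none => false) then false
    else if (match dget? r "blue" with | some v => decide (v > num_blue) | none => false) then false
    -- round['total'] raises KeyError when absent; Pre_ excludes reaching that, getD 0 stands in
    else if decide ((dget? r "total").getD 0 > num_total) then false
    else evalRoundsA num_red num_green num_blue num_total rest

def eval_game (game : List (String × List (List (String × Int)))) (num_red : Int) (num_green : Int) (num_blue : Int) : Bool :=
  let num_total := num_red + num_green + num_blue
  evalRoundsA num_red num_green num_blue num_total ((dget? game "rounds").getD [])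

-- ===== PORT B =====
-- Python max((r[color] for r in rounds if color in r), default=limit)
def worst (rounds : List (List (String × Int))) (color : String) (limit : Int) : Int :=
  match rounds.filterMap (fun r => dget? r color) with
  | [] => limit
  | v :: vs => vs.foldl max v

def eval_game_alt (game : List (String × List (List (String × Int)))) (num_red : Int) (num_green : Int) (num_blue : Int) : Bool :=
  let rounds := (dget? game "rounds").getD []
  decide (worst rounds "red" num_red ≤ num_red) &&
  (decide (worst rounds "green" num_green ≤ num_green) &&
  (decide (worst rounds "blue" num_blue ≤ num_blue) &&
  decide (worst rounds "total" (num_red + num_green + num_blue) ≤ num_red + num_green + num_blue)))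

-- ===== PRECONDITION & SPEC =====
-- helpers used only by Pre_ (per-round facts; no re-run of either port)
def colorViol (r : List (String × Int)) (nr ng nb : Int) : Bool :=
  (match dget? r "red" with | some v => decide (v > nr) | none => false) ||
  (match dget? r "green" with | some v => decide (v > ng) | none => false) ||
  (match dget? r "blue" with | some v => decide (v > nb) | none => false)

def roundOKb (r : List (String × Int)) (nr ng nb nt : Int) : Bool :=
  !colorViol r nr ng nb && (dget? r "total").any (fun v => decide (v ≤ nt))

-- Pre_ is exactly A's return domain: the game has a 'rounds' key, and every round that is reached
-- (all earlier rounds fully pass) either violates a color limit (A returns False before reading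
-- 'total') or carries a 'total' key; everything excluded is an input where A raises KeyError.
def Pre_eval_game (game : List (String × List (List (String × Int)))) (num_red : Int) (num_green : Int) (num_blue : Int) : Prop :=
  (dget? game "rounds").isSome = true ∧
  ∀ i : Fin ((dget? game "rounds").getD []).length,
    (∀ j : Fin ((dget? game "rounds").getD []).length, j.val < i.val →
        roundOKb ((dget? game "rounds").getD [])[j] num_red num_green num_blue (num_red + num_green + num_blue) = true) →
    (colorViol ((dget? game "rounds").getD [])[i] num_red num_green num_blue = true ∨
      (dget? ((dget? game "rounds").getD [])[i] "total").isSome = true)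
instance (game : List (String × List (List (String × Int)))) (num_red : Int) (num_green : Int) (num_blue : Int) : Decidable (Pre_eval_game game num_red num_green num_blue) := by unfold Pre_eval_game; infer_instance

def pvWitness_eval_game : (List (String × List (List (String × Int)))) × Int × Int × Int :=
  ([("rounds", [[("red", 1), ("total", 1)], [("blue", 2), ("total", 2)]])], 2, 2, 2)

def Spec_eval_game (game : List (String × List (List (String × Int)))) (num_red : Int) (num_green : Int) (num_blue : Int) (out : Bool) : Prop := out = eval_game_alt game num_red num_green num_blue
instance (game : List (String × List (List (String × Int)))) (num_red : Int) (num_green : Int) (num_blue : Int) (out : Bool) : Decidable (Spec_eval_game game num_red num_green num_blue out) := by unfold Spec_eval_game; infer_instance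

-- ===== CLAIM (what is proved, stated in full; the proofs are below) =====
def Claim_equal_eval_game : Prop := ∀ (game : List (String × List (List (String × Int)))) (num_red : Int) (num_green : Int) (num_blue : Int), Dom_eval_game game num_red num_green num_blue → Pre_eval_game game num_red num_green num_blue → Spec_eval_game game num_red num_green num_blue (eval_game game num_red num_green num_blue)

-- ===== LEMMAS AND PROOFS =====

lemma foldl_max_le_iff (vs : List Int) (v lim : Int) :
    vs.foldl max v ≤ lim ↔ v ≤ lim ∧ ∀ x ∈ vs, x ≤ lim := by
  induction vs generalizing v with
  | nil => simp
  | cons x xs ih =>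
    simp [List.foldl_cons, ih]
    tauto

lemma worst_le_iff (rounds : List (List (String × Int))) (c : String) (lim : Int) :
    worst rounds c lim ≤ lim ↔ ∀ r ∈ rounds, ∀ v, dget? r c = some v → v ≤ lim := by
  unfold worst
  rcases h : rounds.filterMap (fun r => dget? r c) with _ | ⟨v, vs⟩
  · constructor
    · intro _ r hr v hv
      have : v ∈ rounds.filterMap (fun r => dget? r c) := List.mem_filterMap.2 ⟨r, hr, hv⟩
      simp [h] at this
    · simp
  · rw [foldl_max_le_iff]
    constructor
    · rintro ⟨h1, h2⟩ r hr w hw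
      have : w ∈ rounds.filterMap (fun r => dget? r c) := List.mem_filterMap.2 ⟨r, hr, hw⟩
      rw [h, List.mem_cons] at this
      rcases this with hv | hmem
      · exact hv ▸ h1
      · exact h2 _ hmem
    · intro hall
      have : ∀ w ∈ rounds.filterMap (fun r => dget? r c), w ≤ lim := by
        intro w hw
        rcases List.mem_filterMap.1 hw with ⟨r, hr, hrw⟩
        exact hall r hr w hrw
      rw [h] at this
      exact ⟨this v (by simp), fun x hx => this x (by simp [hx])⟩

lemma evalRoundsA_eq_true_iff (nr ng nb nt : Int) (rounds : List (List (String × Int))) :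
    evalRoundsA nr ng nb nt rounds = true ↔
      ∀ r ∈ rounds,
        (∀ v, dget? r "red" = some v → v ≤ nr) ∧
        (∀ v, dget? r "green" = some v → v ≤ ng) ∧
        (∀ v, dget? r "blue" = some v → v ≤ nb) ∧
        (dget? r "total").getD 0 ≤ nt := by
  induction rounds with
  | nil => simp [evalRoundsA]
  | cons r rest ih =>
    rw [evalRoundsA]
    rcases hr : dget? r "red" with _ | vr <;>
    rcases hg : dget? r "green" with _ | vg <;>
    rcases hb : dget? r "blue" with _ | vb <;>
    simp [ih, hr, hg, hb] <;> tauto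

lemma colorViol_eq_false_iff (r : List (String × Int)) (nr ng nb : Int) :
    colorViol r nr ng nb = false ↔
      (∀ v, dget? r "red" = some v → v ≤ nr) ∧
      (∀ v, dget? r "green" = some v → v ≤ ng) ∧
      (∀ v, dget? r "blue" = some v → v ≤ nb) := by
  unfold colorViol
  rcases hr : dget? r "red" with _ | vr <;>
  rcases hg : dget? r "green" with _ | vg <;>
  rcases hb : dget? r "blue" with _ | vb <;>
  simp <;> tauto

-- under Pre_'s prefix condition, if no round violates anything observable, every round has 'total'
lemma totals_present (rounds : List (List (String × Int))) (nr ng nb nt : Int)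
    (hpre : ∀ i : Fin rounds.length,
      (∀ j : Fin rounds.length, j.val < i.val → roundOKb rounds[j] nr ng nb nt = true) →
      (colorViol rounds[i] nr ng nb = true ∨ (dget? rounds[i] "total").isSome = true))
    (hall : ∀ r ∈ rounds, colorViol r nr ng nb = false ∧ ∀ v, dget? r "total" = some v → v ≤ nt) :
    ∀ r ∈ rounds, (dget? r "total").isSome = true := by
  have key : ∀ i : Nat, ∀ h : i < rounds.length, (dget? rounds[i] "total").isSome = true := by
    intro i
    induction i using Nat.strong_induction_on with
    | _ i ih =>
      intro h
      have := hpre ⟨i, h⟩ (by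
        intro j hj
        have hjm := hall rounds[j.val] (List.getElem_mem _)
        have hjs := ih j.val hj j.isLt
        rcases hsome : dget? rounds[j.val] "total" with _ | w
        · rw [hsome] at hjs; simp at hjs
        · have hw := hjm.2 w hsome
          simp [roundOKb, hjm.1, hsome, hw])
      rcases this with hcv | hs
      · have hf := (hall rounds[i] (List.getElem_mem h)).1
        simp only [Fin.getElem_fin] at hcv
        rw [hf] at hcv; simp at hcv
      · simpa using hs
  intro r hr
  rcases List.mem_iff_getElem.1 hr with ⟨i, h, rfl⟩
  exact key i h

-- ===== VERDICT (by name: the statement is the Claim_ definition above) =====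
theorem eval_game_spec : Claim_equal_eval_game := by
  intro game nr ng nb _ hpre
  rcases hpre with ⟨_, hP⟩
  unfold Spec_eval_game eval_game eval_game_alt
  set rounds := (dget? game "rounds").getD [] with hrounds
  rw [Bool.eq_iff_iff]
  simp only [Bool.and_eq_true, decide_eq_true_eq]
  rw [evalRoundsA_eq_true_iff, worst_le_iff, worst_le_iff, worst_le_iff, worst_le_iff]
  constructor
  · intro h
    have hall : ∀ r ∈ rounds, colorViol r nr ng nb = false ∧
        ∀ v, dget? r "total" = some v → v ≤ nr + ng + nb := by
      intro r hr
      refine ⟨(colorViol_eq_false_iff r nr ng nb).2 ⟨(h r hr).1, (h r hr).2.1, (h r hr).2.2.1⟩,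
        fun v hv => ?_⟩
      have := (h r hr).2.2.2
      rw [hv] at this; simpa using this
    refine ⟨fun r hr => (h r hr).1, fun r hr => (h r hr).2.1, fun r hr => (h r hr).2.2.1,
      fun r hr v hv => ?_⟩
    have := (h r hr).2.2.2
    rw [hv] at this; simpa using this
  · rintro ⟨h1, h2, h3, h4⟩
    have hall : ∀ r ∈ rounds, colorViol r nr ng nb = false ∧
        ∀ v, dget? r "total" = some v → v ≤ nr + ng + nb := by
      intro r hr
      exact ⟨(colorViol_eq_false_iff r nr ng nb).2 ⟨h1 r hr, h2 r hr, h3 r hr⟩, h4 r hr⟩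
    have htot := totals_present rounds nr ng nb (nr + ng + nb) hP hall
    intro r hr
    refine ⟨h1 r hr, h2 r hr, h3 r hr, ?_⟩
    rcases hsome : dget? r "total" with _ | w
    · have := htot r hr; rw [hsome] at this; simp at this
    · simpa using h4 r hr w hsome
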